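-- pv_equiv track=rewrite | github.com/bingart/DemoPython | PyLib/parse_helper.py | title2slug
-- ===== SOURCE A (Python) =====
-- def title2slug(title):
--     s = list(title)
--     slug = ''
--     for c in s:
--         if c.isalnum():
--             slug += c
--         if c == ' ':
--             slug += '-'
--     return slug.lower()
-- ===== SOURCE B (Python) =====
-- def title2slug(title):
--     words = title.split(' ')
--     cleaned = '-'.join(''.join(c for c in w if c.isalnum()) for w in words)
--     return cleaned.lower()
-- ===== Notes on version B (the rewrite author's own statement) =====
-- stated objective: simpler
-- what changed: Replaced A's character-by-character loop with two conditional accumulator appends by a split-on-space / per-word alnum filter / dash-join pipeline.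
import Mathlib
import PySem

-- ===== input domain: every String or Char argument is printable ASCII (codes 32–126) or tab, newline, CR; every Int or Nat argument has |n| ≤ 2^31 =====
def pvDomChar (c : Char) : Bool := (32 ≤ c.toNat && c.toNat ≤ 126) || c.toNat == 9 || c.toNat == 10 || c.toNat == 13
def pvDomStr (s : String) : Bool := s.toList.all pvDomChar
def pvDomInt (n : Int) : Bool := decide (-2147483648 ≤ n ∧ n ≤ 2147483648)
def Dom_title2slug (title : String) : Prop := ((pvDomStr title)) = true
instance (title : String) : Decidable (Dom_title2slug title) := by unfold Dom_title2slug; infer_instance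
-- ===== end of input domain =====

-- B replaces A's char-by-char accumulator loop with a different decomposition:
-- split on ' ', filter each word to its alphanumerics, join with '-', lower (objective: simpler).

-- ===== PORT A =====
-- A: one loop over the characters, appending c when alnum and '-' when c == ' ', then .lower().
def title2slug (title : String) : String :=
  let s := title.toList
  let slug := s.foldl (fun slug c =>
    let slug := if PySem.Chars.isalnum c then slug ++ [c] else slug
    if c = ' ' then slug ++ ['-'] else slug) ([] : List Char)
  String.mk (PySem.Chars.lower slug)

-- ===== PORT B =====
-- B: title.split(' '), keep only alnum chars of each word, '-'.join, .lower().
def title2slug_alt (title : String) : String :=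
  let words := PySem.Chars.splitOn title.toList [' ']
  let cleaned := words.map (fun w => w.filter PySem.Chars.isalnum)
  String.mk (PySem.Chars.lower (PySem.Chars.join ['-'] cleaned))

-- ===== PRECONDITION & SPEC =====
def Spec_title2slug (title : String) (out : String) : Prop := out = title2slug_alt title
instance (title : String) (out : String) : Decidable (Spec_title2slug title out) := by unfold Spec_title2slug; infer_instance

-- ===== CLAIM (what is proved, stated in full; the proofs are below) =====
def Claim_equal_title2slug : Prop := ∀ (title : String), Dom_title2slug title → Spec_title2slug title (title2slug title)

-- ===== LEMMAS AND PROOFS =====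

-- what each character contributes to A's accumulator
def pvDelta (c : Char) : List Char :=
  (if PySem.Chars.isalnum c then [c] else []) ++ (if c = ' ' then ['-'] else [])

theorem pvFoldl_delta (cs : List Char) (acc : List Char) :
    cs.foldl (fun slug c =>
      let slug := if PySem.Chars.isalnum c then slug ++ [c] else slug
      if c = ' ' then slug ++ ['-'] else slug) acc = acc ++ cs.flatMap pvDelta := by
  induction cs generalizing acc with
  | nil => simp
  | cons c cs ih =>
    simp only [List.foldl_cons, List.flatMap_cons, ih, pvDelta]
    split_ifs <;> simp

-- head-wise recursion computing split(' ')
def pvSplit : List Char → List (List Char)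
  | [] => [[]]
  | c :: cs =>
    if c = ' ' then [] :: pvSplit cs
    else match pvSplit cs with
      | [] => [[c]]   -- unreachable: pvSplit is never []
      | w :: ws => (c :: w) :: ws

theorem pvSplit_ne_nil (cs : List Char) : pvSplit cs ≠ [] := by
  cases cs with
  | nil => simp [pvSplit]
  | cons c cs =>
    simp only [pvSplit]
    split_ifs
    · simp
    · cases h : pvSplit cs <;> simp

theorem pvSplitOn_go_eq (cs : List Char) :
    ∀ fuel, cs.length < fuel → ∀ (cur : List Char) (acc : List (List Char)),
      PySem.Chars.splitOn.go [' '] fuel cs cur acc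
        = acc.reverse ++ ((pvSplit cs).modifyHead (cur.reverse ++ ·)) := by
  induction cs with
  | nil =>
    intro fuel hf cur acc
    match fuel, hf with
    | fuel + 1, _ => simp [PySem.Chars.splitOn.go, pvSplit]
  | cons c cs ih =>
    intro fuel hf cur acc
    match fuel, hf with
    | fuel + 1, hf =>
      simp only [PySem.Chars.splitOn.go]
      by_cases hc : c = ' '
      · have hpre : [' '].isPrefixOf (c :: cs) = true := by simp [hc, List.isPrefixOf]
        rw [if_pos hpre]
        have : cs.length < fuel := by simpa using Nat.lt_of_succ_lt_succ hf
        simp only [List.length_cons, List.length_nil, List.drop_succ_cons, List.drop_zero]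
        rw [ih fuel this [] (cur.reverse :: acc)]
        cases h : pvSplit cs with
        | nil => exact absurd h (pvSplit_ne_nil cs)
        | cons w ws => simp [pvSplit, hc, h]
      · have hpre : [' '].isPrefixOf (c :: cs) = false := by
          simp [List.isPrefixOf]; exact fun h => hc h.symm
        rw [if_neg (by simp [hpre])]
        have : cs.length < fuel := by simpa using Nat.lt_of_succ_lt_succ hf
        rw [ih fuel this (c :: cur) acc]
        simp only [pvSplit, if_neg hc]
        cases h : pvSplit cs with
        | nil => exact absurd h (pvSplit_ne_nil cs)
        | cons w ws => simp

theorem pvSplitOn_eq (cs : List Char) : PySem.Chars.splitOn cs [' '] = pvSplit cs := by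
  unfold PySem.Chars.splitOn
  rw [pvSplitOn_go_eq cs (cs.length + 1) (Nat.lt_succ_self _) [] []]
  cases h : pvSplit cs with
  | nil => exact absurd h (pvSplit_ne_nil cs)
  | cons w ws => simp

theorem pvJoin_cons (x : List Char) (xs : List (List Char)) :
    PySem.Chars.join ['-'] (x :: xs)
      = x ++ (if xs = [] then [] else '-' :: PySem.Chars.join ['-'] xs) := by
  cases xs with
  | nil => simp [PySem.Chars.join, List.intercalate]
  | cons y ys => simp [PySem.Chars.join, List.intercalate, List.intersperse]

theorem pvJoin_split (cs : List Char) :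
    PySem.Chars.join ['-'] ((pvSplit cs).map (fun w => w.filter PySem.Chars.isalnum))
      = cs.flatMap pvDelta := by
  induction cs with
  | nil => simp [pvSplit, PySem.Chars.join, List.intercalate]
  | cons c cs ih =>
    simp only [pvSplit, List.flatMap_cons]
    by_cases hc : c = ' '
    · rw [if_pos hc, List.map_cons, pvJoin_cons]
      have hne : (pvSplit cs).map (fun w => w.filter PySem.Chars.isalnum) ≠ [] := by
        simp [pvSplit_ne_nil cs]
      rw [if_neg hne, ih]
      subst hc
      simp [pvDelta]; decide
    · rw [if_neg hc]
      cases h : pvSplit cs with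
      | nil => exact absurd h (pvSplit_ne_nil cs)
      | cons w ws =>
        rw [h] at ih
        simp only [List.map_cons, pvJoin_cons, List.filter_cons] at ih ⊢
        rw [pvDelta, if_neg hc]
        by_cases ha : PySem.Chars.isalnum c
        · simp only [ha, if_pos] at *
          simp [← ih]
        · simp only [ha] at *
          simp [← ih]

-- ===== VERDICT (by name: the statement is the Claim_ definition above) =====
theorem title2slug_spec : Claim_equal_title2slug := by
  intro title _
  simp only [Spec_title2slug, title2slug, title2slug_alt, pvSplitOn_eq, pvJoin_split,
    pvFoldl_delta, List.nil_append]
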